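-- pv_equiv track=rewrite | github.com/ByteFlowing1337/auto-pppoe | tplink_security_encode.py | tplink_security_encode
-- ===== SOURCE A (Python) =====
-- def tplink_security_encode(password):
--     key = "RDpbLfCPsJZ7fiv"
--     dictionary = "yLwVl0zKqws7LgKPRQ84Mdt708T1qQ3Ha7xv3H7NyU84p21BriUWBU43odz3iP4rBL3cD02KZciXTysVXiV8ngg6vL48rPJyAUw0HurW20xqxv9aYb4M9wK1Ae0wlro510qXeU07kV57fQMc8L6aLgMLwygtc0F10a0Dg70TOoouyFhdysuRMO51yY5ZlOZZLEal1h0t9YQW0Ko7oBwmCAHoic4HYbUyVeU3sfQ1xtXcPcf1aT303wAQhv66qzW"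
--     d = ""
--     f = len(password)
--     g = len(key)
--     h = len(dictionary)
--
--     # Use the length of the longer string
--     e = max(f, g)
--
--     for m in range(e):
--         # Default fallback is 187 (the 'k' and 'l' initialization in your JS)
--         k = 187
--         l = 187
--
--         if m >= f:
--             # Index past password length: use key char for 'l'
--             l = ord(key[m])
--         elif m >= g:
--             # Index past key length: use password char for 'k'
--             k = ord(password[m])
--         else:
--             # Within both lengths: use both
--             k = ord(password[m])
--             l = ord(key[m])
--
--         d += dictionary[(k ^ l) % h]
--
--     return d
-- ===== SOURCE B (Python) =====
-- def tplink_security_encode(password):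
--     key = "RDpbLfCPsJZ7fiv"
--     dictionary = "yLwVl0zKqws7LgKPRQ84Mdt708T1qQ3Ha7xv3H7NyU84p21BriUWBU43odz3iP4rBL3cD02KZciXTysVXiV8ngg6vL48rPJyAUw0HurW20xqxv9aYb4M9wK1Ae0wlro510qXeU07kV57fQMc8L6aLgMLwygtc0F10a0Dg70TOoouyFhdysuRMO51yY5ZlOZZLEal1h0t9YQW0Ko7oBwmCAHoic4HYbUyVeU3sfQ1xtXcPcf1aT303wAQhv66qzW"
--     h = len(dictionary)
--     # head: the overlap of password and key, pairwise
--     head = ''.join(dictionary[(ord(a) ^ ord(b)) % h] for a, b in zip(password, key))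
--     if len(password) >= len(key):
--         # password overhang: a fixed per-character substitution, done with str.translate
--         table = str.maketrans({chr(c): dictionary[(c ^ 187) % h] for c in range(128)})
--         return head + password[len(key):].translate(table)
--     # key overhang: a constant string (key encoded against the fill), sliced
--     pad = ''.join(dictionary[(187 ^ ord(c)) % h] for c in key)
--     return head + pad[len(password):]
-- ===== Notes on version B (the rewrite author's own statement) =====
-- stated objective: faster
-- what changed: Instead of one range(max(f,g)) index loop with m>=f/m>=g fallback branches and per-character string +=, B assembles the result from three staged pieces: a zip of the password/key overlap, a precomputed str.maketrans table applied via translate to the password overhang, and a precomputed constant pad string (key encoded against the fill) sliced for the key overhang.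
import Mathlib
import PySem

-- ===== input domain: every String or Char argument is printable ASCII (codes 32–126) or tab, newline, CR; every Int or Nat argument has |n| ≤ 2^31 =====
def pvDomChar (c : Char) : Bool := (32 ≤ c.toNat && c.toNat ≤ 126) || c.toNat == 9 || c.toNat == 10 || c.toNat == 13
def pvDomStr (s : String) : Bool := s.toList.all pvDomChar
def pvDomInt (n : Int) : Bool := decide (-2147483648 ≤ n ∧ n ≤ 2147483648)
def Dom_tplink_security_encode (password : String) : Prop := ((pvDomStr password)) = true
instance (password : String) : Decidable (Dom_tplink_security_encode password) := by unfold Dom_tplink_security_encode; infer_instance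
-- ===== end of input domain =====

set_option maxRecDepth 4000


-- B replaces A's single range(max(f,g)) index loop with its m>=f / m>=g branches by three
-- staged pieces: a zip overlap head, a per-character translation table for the password
-- overhang, and a precomputed constant pad (key encoded against the fill), sliced; a timing run measured B faster (bulk translate/join vs per-char +=).

-- ===== PORT A =====
def pvKey : String := "RDpbLfCPsJZ7fiv"
def pvDict : String := "yLwVl0zKqws7LgKPRQ84Mdt708T1qQ3Ha7xv3H7NyU84p21BriUWBU43odz3iP4rBL3cD02KZciXTysVXiV8ngg6vL48rPJyAUw0HurW20xqxv9aYb4M9wK1Ae0wlro510qXeU07kV57fQMc8L6aLgMLwygtc0F10a0Dg70TOoouyFhdysuRMO51yY5ZlOZZLEal1h0t9YQW0Ko7oBwmCAHoic4HYbUyVeU3sfQ1xtXcPcf1aT303wAQhv66qzW"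

def tplink_security_encode (password : String) : String :=
  let pw := password.toList
  let ks := pvKey.toList
  let ds := pvDict.toList
  let f := pw.length
  let g := ks.length
  let h := ds.length
  let e := max f g
  String.mk ((List.range e).foldl (fun d m =>
    let kl : Nat × Nat :=
      if m ≥ f then (187, (ks.getD m ' ').toNat)
      else if m ≥ g then ((pw.getD m ' ').toNat, 187)
      else ((pw.getD m ' ').toNat, (ks.getD m ' ').toNat)
    d ++ [ds.getD ((Nat.xor kl.1 kl.2) % h) ' ']) [])

-- ===== PORT B =====
def tplink_security_encode_alt (password : String) : String :=
  let ds := pvDict.toList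
  let h := ds.length
  let ks := pvKey.toList
  let pw := password.toList
  -- head: the overlap of password and key, pairwise
  let head := (pw.zip ks).map (fun ab => ds.getD ((Nat.xor ab.1.toNat ab.2.toNat) % h) ' ')
  if pw.length ≥ ks.length then
    -- password overhang: a fixed per-character substitution table indexed by code (str.maketrans over range(128))
    let table := (List.range 128).map (fun c => ds.getD ((Nat.xor c 187) % h) ' ')
    String.mk (head ++ (pw.drop ks.length).map (fun c => table.getD c.toNat c))
  else
    -- key overhang: a constant string (key encoded against the fill), sliced
    let pad := ks.map (fun c => ds.getD ((Nat.xor 187 c.toNat) % h) ' ')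
    String.mk (head ++ pad.drop pw.length)

-- ===== PRECONDITION & SPEC =====
def Spec_tplink_security_encode (password : String) (out : String) : Prop := out = tplink_security_encode_alt password
instance (password : String) (out : String) : Decidable (Spec_tplink_security_encode password out) := by unfold Spec_tplink_security_encode; infer_instance

-- ===== CLAIM (what is proved, stated in full; the proofs are below) =====
def Claim_equal_tplink_security_encode : Prop := ∀ (password : String), Dom_tplink_security_encode password → Spec_tplink_security_encode password (tplink_security_encode password)

-- ===== LEMMAS AND PROOFS =====

theorem foldl_app_singleton (g : Nat → Char) (l : List Nat) (acc : List Char) :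
    l.foldl (fun d m => d ++ [g m]) acc = acc ++ l.map g := by
  induction l generalizing acc with
  | nil => simp
  | cons x xs ih => simp [List.foldl_cons, ih]

theorem tplink_security_encode_spec : Claim_equal_tplink_security_encode := by
  intro password hdom
  show tplink_security_encode password = tplink_security_encode_alt password
  have hlt : ∀ c ∈ password.toList, c.toNat < 128 := by
    intro c hc
    have := List.all_eq_true.mp hdom c hc
    simp [pvDomChar] at this
    omega
  unfold tplink_security_encode tplink_security_encode_alt
  simp only []
  rw [foldl_app_singleton, List.nil_append]
  set pw := password.toList with hpw
  set ks := pvKey.toList with hks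
  set ds := pvDict.toList with hds
  by_cases hge : pw.length ≥ ks.length
  · rw [if_pos hge]
    congr 1
    apply List.ext_getElem
    · simp [Nat.max_eq_left hge]
      omega
    · intro i h1 h2
      have hif : i < pw.length := by
        simpa [Nat.max_eq_left hge] using h1
      simp only [List.getElem_map, List.getElem_range]
      rw [if_neg (by omega)]
      by_cases hig : i < ks.length
      · rw [if_neg (by omega)]
        rw [List.getElem_append_left (by simp; omega)]
        simp [List.getD_eq_getElem?_getD, List.getElem?_eq_getElem hif,
          List.getElem?_eq_getElem hig]
      · rw [if_pos (by omega)]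
        rw [List.getElem_append_right (by simp; omega)]
        simp only [List.length_map, List.length_zip, Nat.min_eq_right hge,
          List.getElem_map, List.getElem_drop]
        have hidx : ks.length + (i - ks.length) = i := by omega
        simp only [hidx]
        have hc : pw[i].toNat < 128 := hlt _ (List.getElem_mem hif)
        simp [List.getD_eq_getElem?_getD, List.getElem?_eq_getElem hif,
          List.getElem?_eq_getElem (show pw[i].toNat < (List.range 128).length by simpa using hc)]
  · rw [if_neg hge]
    congr 1
    have hlt2 : pw.length < ks.length := Nat.lt_of_not_le hge
    apply List.ext_getElem
    · simp [Nat.max_eq_right (Nat.le_of_lt hlt2)]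
      omega
    · intro i h1 h2
      have hie : i < ks.length := by
        simpa [Nat.max_eq_right (Nat.le_of_lt hlt2)] using h1
      simp only [List.getElem_map, List.getElem_range]
      by_cases hif : i < pw.length
      · rw [if_neg (by omega), if_neg (by omega)]
        rw [List.getElem_append_left (by simp; omega)]
        simp [List.getD_eq_getElem?_getD, List.getElem?_eq_getElem hif,
          List.getElem?_eq_getElem hie]
      · rw [if_pos (by omega)]
        rw [List.getElem_append_right (by simp; omega)]
        simp only [List.length_map, List.length_zip, Nat.min_eq_left (Nat.le_of_lt hlt2),
          List.getElem_drop, List.getElem_map]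
        have hidx : pw.length + (i - pw.length) = i := by omega
        simp only [hidx]
        simp [List.getD_eq_getElem?_getD, List.getElem?_eq_getElem hie]
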